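-- pv_equiv track=rewrite | github.com/peppermayoo/codetree-TILs | 240113/2개 이상의 알파벳/more-than-one-alphabet.py | solution
-- ===== SOURCE A (Python) =====
-- def solution(x):
--     a_list = []
--     for i in range(len(x)):
--         a_list.append(x[i])
--     ans = set(a_list)
--     if len(ans) >= 2:
--       return 'Yes'
--     return 'No'
-- ===== SOURCE B (Python) =====
-- def solution(x):
--     return 'Yes' if any(c != x[0] for c in x) else 'No'
-- ===== Notes on version B (the rewrite author's own statement) =====
-- stated objective: simpler
-- what changed: Instead of copying the string into a list and materialising the set of its distinct characters, B does a single short-circuiting scan for any character different from the first, maintaining no collection at all (a timing run measured this constant-factor win).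
import Mathlib
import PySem

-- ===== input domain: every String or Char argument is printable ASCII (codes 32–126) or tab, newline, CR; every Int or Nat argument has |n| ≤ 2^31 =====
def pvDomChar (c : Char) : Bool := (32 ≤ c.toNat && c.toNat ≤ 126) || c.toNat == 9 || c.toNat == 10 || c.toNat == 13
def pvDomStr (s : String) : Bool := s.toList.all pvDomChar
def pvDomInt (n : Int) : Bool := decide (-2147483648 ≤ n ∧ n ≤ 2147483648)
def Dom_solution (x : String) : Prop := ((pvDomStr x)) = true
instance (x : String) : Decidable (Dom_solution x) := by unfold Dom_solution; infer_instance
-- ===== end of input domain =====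

-- B drops A's list copy and set of distinct characters and instead scans for any
-- character different from the first (objective: simpler).

-- ===== PORT A =====
def solution (x : String) : String :=
  let a_list : List Char :=
    (PySem.List.pyRange 0 (x.toList.length) 1).foldl
      (fun acc i => acc ++ [PySem.List.pyGetD x.toList i ' ']) []
  let ans : PySem.Set Char := PySem.Set.ofList a_list
  if 2 ≤ PySem.Set.len ans then "Yes" else "No"

-- ===== PORT B =====
def solution_alt (x : String) : String :=
  match x.toList with
  | [] => "No"
  | c0 :: rest => if (c0 :: rest).any (fun c => c != c0) then "Yes" else "No"

-- ===== PRECONDITION & SPEC =====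
def Spec_solution (x : String) (out : String) : Prop := out = solution_alt x
instance (x : String) (out : String) : Decidable (Spec_solution x out) := by unfold Spec_solution; infer_instance

-- ===== CLAIM (what is proved, stated in full; the proofs are below) =====
def Claim_equal_solution : Prop := ∀ (x : String), Dom_solution x → Spec_solution x (solution x)

-- ===== LEMMAS AND PROOFS =====

-- a set all of whose elements equal c0 has at most one element
theorem len_le_one_of_all_eq {α : Type} [BEq α] [LawfulBEq α] (s : List α) (c0 : α)
    (hnd : s.Nodup) (h : ∀ a ∈ s, a = c0) : s.length ≤ 1 := by
  match s with
  | [] => simp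
  | [a] => simp
  | a :: b :: t =>
    exfalso
    have ha : a = c0 := h a (by simp)
    have hb : b = c0 := h b (by simp)
    rw [List.nodup_cons] at hnd
    exact hnd.1 (by simp [ha.trans hb.symm])

-- a list containing two distinct elements has length ≥ 2
theorem two_le_len_of_mem_ne {α : Type} (s : List α) (a b : α)
    (ha : a ∈ s) (hb : b ∈ s) (hne : b ≠ a) : 2 ≤ s.length := by
  match s with
  | [] => simp at ha
  | [x] =>
    simp at ha hb
    exact absurd (hb.trans ha.symm) hne
  | x :: y :: t => simp only [List.length_cons]; omega

-- the set of c0 :: rest has ≥ 2 elements iff some element differs from c0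
theorem two_le_len_ofList_iff {α : Type} [BEq α] [LawfulBEq α] (c0 : α) (rest : List α) :
    2 ≤ (PySem.Set.ofList (c0 :: rest)).length ↔ ∃ c ∈ c0 :: rest, c ≠ c0 := by
  constructor
  · intro h2
    by_contra hno
    push Not at hno
    have := len_le_one_of_all_eq (PySem.Set.ofList (c0 :: rest)) c0
      (PySem.Set.nodup_ofList _) (fun a ha => hno a ((PySem.Set.mem_ofList _ _).mp ha))
    omega
  · rintro ⟨c, hc, hne⟩
    exact two_le_len_of_mem_ne _ c0 c
      ((PySem.Set.mem_ofList _ _).mpr (by simp))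
      ((PySem.Set.mem_ofList _ _).mpr hc) hne

-- ===== VERDICT (by name: the statement is the Claim_ definition above) =====
theorem solution_spec : Claim_equal_solution := by
  intro x _
  unfold Spec_solution solution solution_alt
  have hlist : (PySem.List.pyRange 0 (x.toList.length) 1).foldl
      (fun acc i => acc ++ [PySem.List.pyGetD x.toList i ' ']) [] = x.toList := by
    exact (PySem.List.foldl_pyRange_zero_pyGetD' x.toList ' '
      (fun (acc : List Char) (c : Char) => acc ++ [c]) []).trans
      (PySem.List.foldl_append_singleton_eq_self x.toList [])
  simp only [hlist]
  match hx : x.toList with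
  | [] => decide
  | c0 :: rest =>
    simp only [PySem.Set.len]
    by_cases h : (2:Int) ≤ ((PySem.Set.ofList (c0 :: rest)).length : Int)
    · have hex := (two_le_len_ofList_iff c0 rest).mp (by exact_mod_cast h)
      rw [if_pos h, if_pos ?_]
      obtain ⟨c, hc, hne⟩ := hex
      exact List.any_eq_true.mpr ⟨c, hc, by simpa using hne⟩
    · rw [if_neg h, if_neg ?_]
      intro hany
      obtain ⟨c, hc, hne⟩ := List.any_eq_true.mp hany
      exact h (by exact_mod_cast (two_le_len_ofList_iff c0 rest).mpr ⟨c, hc, by simpa using hne⟩)
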